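-- pv_equiv track=rewrite | github.com/USPTOCode/uspto-newsletter | backend/src/free/free_content_fetcher.py | format_social_content_html
-- ===== SOURCE A (Python) =====
-- from typing import List, Dict, Any
--
-- def format_social_content_html(items: List[Dict[str, Any]]) -> str:
--     """Format social media and blog content into HTML."""
--     if not items:
--         return ""
--
--     html = "<h2>From Around the Web</h2>\n"
--     html += "<p><em>Stay updated with the latest content from data experts:</em></p>\n"
--
--     # Group by type
--     by_type = {}
--     for item in items:
--         item_type = item.get('type', 'other')
--         if item_type not in by_type:
--             by_type[item_type] = []
--         by_type[item_type].append(item)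
--
--     # Format YouTube videos
--     if 'youtube' in by_type and by_type['youtube']:
--         html += "<h3>Latest Videos</h3>\n<ul>\n"
--         for item in by_type['youtube'][:3]:
--             html += f'<li><strong><a href="{item.get("link", "#")}">{item.get("title", "YouTube Video")}</a></strong><br>\n'
--             html += f"<p>{item.get('description', '')}</p>\n"
--             html += f'<p><em>From {item.get("source", "YouTube")}</em></p></li>\n'
--         html += "</ul>\n"
--
--     # Format Twitter posts
--     if 'twitter' in by_type and by_type['twitter']:
--         html += "<h3>Twitter/X Highlights</h3>\n<ul>\n"
--         for item in by_type['twitter'][:3]: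
--             html += f'<li><strong><a href="{item.get("link", "#")}">{item.get("title", "Tweet")}</a></strong><br>\n'
--             html += f"<p>{item.get('description', '')}</p>\n"
--             html += f'<p><em>From {item.get("source", "Twitter/X")}</em></p></li>\n'
--         html += "</ul>\n"
--
--     # Format Blog posts if they're not already included elsewhere
--     if 'blog' in by_type and by_type['blog']:
--         html += "<h3>Data Science Blogs</h3>\n<ul>\n"
--         for item in by_type['blog'][:3]:
--             description = item.get('summary', '') or item.get('description', '')
--             if len(description) > 150:
--                 description = description[:147] + "..."
--
--             html += f'<li><strong><a href="{item.get("link", "#")}">{item.get("title", "Blog Post")}</a></strong><br>\n'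
--             html += f"<p>{description}</p>\n"
--             html += f'<p><em>From {item.get("source", "Blog")}</em></p></li>\n'
--         html += "</ul>\n"
--
--     return html
-- ===== SOURCE B (Python) =====
-- def format_social_content_html(items):
--     """Format social media and blog content into HTML."""
--     if not items:
--         return ""
--
--     parts = [
--         "<h2>From Around the Web</h2>\n",
--         "<p><em>Stay updated with the latest content from data experts:</em></p>\n",
--     ]
--     sections = [
--         ("youtube", "Latest Videos", "YouTube Video", "YouTube"),
--         ("twitter", "Twitter/X Highlights", "Tweet", "Twitter/X"),
--         ("blog", "Data Science Blogs", "Blog Post", "Blog"),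
--     ]
--     for t, heading, default_title, default_source in sections:
--         chosen = [x for x in items if x.get('type', 'other') == t][:3]
--         if not chosen:
--             continue
--         parts.append(f"<h3>{heading}</h3>\n<ul>\n")
--         parts.extend(_render_item(t, default_title, default_source, x) for x in chosen)
--         parts.append("</ul>\n")
--     return "".join(parts)
--
--
-- def _render_item(t, default_title, default_source, item):
--     if t == 'blog':
--         desc = item.get('summary', '') or item.get('description', '')
--         if len(desc) > 150:
--             desc = desc[:147] + "..."
--     else:
--         desc = item.get('description', '')
--     return (f'<li><strong><a href="{item.get("link", "#")}">{item.get("title", default_title)}</a></strong><br>\n'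
--             f"<p>{desc}</p>\n"
--             f'<p><em>From {item.get("source", default_source)}</em></p></li>\n')
-- ===== Notes on version B (the rewrite author's own statement) =====
-- stated objective: simpler
-- what changed: B drops A's dict-of-buckets grouping pass entirely: each of the three sections is produced by a direct filter of the original item list (capped at 3), driven by a small section table, and the HTML is assembled by joining a list of parts instead of repeated string reassignment.
import Mathlib
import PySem

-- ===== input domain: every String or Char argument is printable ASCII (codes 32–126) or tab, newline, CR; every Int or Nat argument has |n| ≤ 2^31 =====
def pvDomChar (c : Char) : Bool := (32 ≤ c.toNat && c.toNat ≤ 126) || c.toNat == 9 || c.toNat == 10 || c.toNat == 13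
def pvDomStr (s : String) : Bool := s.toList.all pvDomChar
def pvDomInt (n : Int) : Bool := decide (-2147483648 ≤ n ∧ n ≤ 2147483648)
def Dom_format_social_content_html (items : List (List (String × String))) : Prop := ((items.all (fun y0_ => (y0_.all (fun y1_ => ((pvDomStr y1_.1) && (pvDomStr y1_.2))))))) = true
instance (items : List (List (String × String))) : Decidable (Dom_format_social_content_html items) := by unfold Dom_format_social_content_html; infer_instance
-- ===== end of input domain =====

-- B replaces A's dict-of-buckets grouping pass by three direct filters over the item list
-- and assembles the HTML from a list of parts (objective: simpler; return value only, no mutation).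

-- item.get(k, d) on a Python dict ported as an association list
def pvGet (item : List (String × String)) (k d : String) : String :=
  (PySem.Dict.mk item).getD k d

-- ===== PORT A =====
-- one iteration of A's grouping loop over `items`
def pvGroupStep (d : PySem.Dict String (List (List (String × String))))
    (item : List (String × String)) : PySem.Dict String (List (List (String × String))) :=
  (if d.contains (pvGet item "type" "other") = false
   then d.insert (pvGet item "type" "other") [] else d).modify
    (pvGet item "type" "other") [] (fun l => l ++ [item])

def format_social_content_html (items : List (List (String × String))) : String :=
  if items = [] then ""
  else
    let html := "<h2>From Around the Web</h2>\n"
    let html := html ++ "<p><em>Stay updated with the latest content from data experts:</em></p>\n"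
    let by_type := items.foldl pvGroupStep PySem.Dict.empty
    let html :=
      if by_type.contains "youtube" = true ∧ by_type.getD "youtube" [] ≠ [] then
        ((PySem.List.slice (by_type.getD "youtube" []) none (some 3)).foldl (fun h item =>
          ((h ++ ("<li><strong><a href=\"" ++ pvGet item "link" "#" ++ "\">" ++ pvGet item "title" "YouTube Video" ++ "</a></strong><br>\n"))
            ++ ("<p>" ++ pvGet item "description" "" ++ "</p>\n"))
            ++ ("<p><em>From " ++ pvGet item "source" "YouTube" ++ "</em></p></li>\n"))
          (html ++ "<h3>Latest Videos</h3>\n<ul>\n")) ++ "</ul>\n"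
      else html
    let html :=
      if by_type.contains "twitter" = true ∧ by_type.getD "twitter" [] ≠ [] then
        ((PySem.List.slice (by_type.getD "twitter" []) none (some 3)).foldl (fun h item =>
          ((h ++ ("<li><strong><a href=\"" ++ pvGet item "link" "#" ++ "\">" ++ pvGet item "title" "Tweet" ++ "</a></strong><br>\n"))
            ++ ("<p>" ++ pvGet item "description" "" ++ "</p>\n"))
            ++ ("<p><em>From " ++ pvGet item "source" "Twitter/X" ++ "</em></p></li>\n"))
          (html ++ "<h3>Twitter/X Highlights</h3>\n<ul>\n")) ++ "</ul>\n"
      else html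
    let html :=
      if by_type.contains "blog" = true ∧ by_type.getD "blog" [] ≠ [] then
        ((PySem.List.slice (by_type.getD "blog" []) none (some 3)).foldl (fun h item =>
          let description := if pvGet item "summary" "" ≠ "" then pvGet item "summary" "" else pvGet item "description" ""
          let description := if PySem.Str.len description > 150 then PySem.Str.slice description none (some 147) ++ "..." else description
          ((h ++ ("<li><strong><a href=\"" ++ pvGet item "link" "#" ++ "\">" ++ pvGet item "title" "Blog Post" ++ "</a></strong><br>\n"))
            ++ ("<p>" ++ description ++ "</p>\n"))
            ++ ("<p><em>From " ++ pvGet item "source" "Blog" ++ "</em></p></li>\n"))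
          (html ++ "<h3>Data Science Blogs</h3>\n<ul>\n")) ++ "</ul>\n"
      else html
    html

-- ===== PORT B =====
-- _render_item in Source B
def pvRender (t defTitle defSource : String) (item : List (String × String)) : String :=
  let desc :=
    if t = "blog" then
      let d0 := if pvGet item "summary" "" ≠ "" then pvGet item "summary" "" else pvGet item "description" ""
      if PySem.Str.len d0 > 150 then PySem.Str.slice d0 none (some 147) ++ "..." else d0
    else pvGet item "description" ""
  ("<li><strong><a href=\"" ++ pvGet item "link" "#" ++ "\">" ++ pvGet item "title" defTitle ++ "</a></strong><br>\n")
    ++ ("<p>" ++ desc ++ "</p>\n")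
    ++ ("<p><em>From " ++ pvGet item "source" defSource ++ "</em></p></li>\n")

def format_social_content_html_alt (items : List (List (String × String))) : String :=
  if items = [] then ""
  else
    let sections : List (String × String × String × String) :=
      [("youtube", "Latest Videos", "YouTube Video", "YouTube"),
       ("twitter", "Twitter/X Highlights", "Tweet", "Twitter/X"),
       ("blog", "Data Science Blogs", "Blog Post", "Blog")]
    let parts := sections.foldl (fun ps sec =>
        let chosen := (items.filter (fun x => pvGet x "type" "other" == sec.1)).take 3
        if chosen.isEmpty then ps
        else ((ps ++ ["<h3>" ++ sec.2.1 ++ "</h3>\n<ul>\n"])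
               ++ chosen.map (pvRender sec.1 sec.2.2.1 sec.2.2.2)) ++ ["</ul>\n"])
      ["<h2>From Around the Web</h2>\n",
       "<p><em>Stay updated with the latest content from data experts:</em></p>\n"]
    String.join parts

-- ===== PRECONDITION & SPEC =====
def Spec_format_social_content_html (items : List (List (String × String))) (out : String) : Prop := out = format_social_content_html_alt items
instance (items : List (List (String × String))) (out : String) : Decidable (Spec_format_social_content_html items out) := by unfold Spec_format_social_content_html; infer_instance

-- ===== CLAIM (what is proved, stated in full; the proofs are below) =====
def Claim_equal_format_social_content_html : Prop := ∀ (items : List (List (String × String))), Dom_format_social_content_html items → Spec_format_social_content_html items (format_social_content_html items)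

-- ===== LEMMAS AND PROOFS =====

-- A's grouping dict holds, at each key, exactly the items of that type in order
theorem pv_getD_group (l : List (List (String × String)))
    (d : PySem.Dict String (List (List (String × String)))) (t : String) :
    (l.foldl pvGroupStep d).getD t []
      = d.getD t [] ++ l.filter (fun x => pvGet x "type" "other" == t) := by
  induction l generalizing d with
  | nil => simp
  | cons x xs ih =>
    have hstep : (pvGroupStep d x).getD t []
        = d.getD t [] ++ if pvGet x "type" "other" == t then [x] else [] := by
      rw [pvGroupStep]
      by_cases hc : d.contains (pvGet x "type" "other") = false
      · rw [if_pos hc, PySem.Dict.getD_modify]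
        have hd0 := PySem.Dict.getD_of_not_contains d ([] : List (List (String × String))) hc
        by_cases ht : t = pvGet x "type" "other"
        · simp [ht, hd0]
        · simp [ht, PySem.Dict.getD_insert, beq_iff_eq, Ne.symm ht]
      · rw [if_neg hc, PySem.Dict.getD_modify]
        by_cases ht : t = pvGet x "type" "other"
        · simp [ht]
        · simp [ht, beq_iff_eq, Ne.symm ht]
    rw [List.foldl_cons, ih, hstep]
    by_cases ht : pvGet x "type" "other" == t <;> simp [ht]

theorem pv_contains_of_getD_ne (d : PySem.Dict String (List (List (String × String)))) (t : String)
    (h : d.getD t [] ≠ []) : d.contains t = true := by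
  cases hc : d.contains t with
  | true => rfl
  | false => exact absurd (PySem.Dict.getD_of_not_contains d [] hc) h

-- an appending string fold is the initial string followed by the join of the pieces
theorem pv_foldl_append (l : List String) : ∀ b : String, l.foldl (· ++ ·) b = b ++ String.join l := by
  induction l with
  | nil => intro b; simp [String.join]
  | cons x t ih =>
    intro b
    have hx : String.join (x :: t) = x ++ String.join t := by
      simp only [String.join, List.foldl_cons, String.empty_append]
      exact ih x
    simp only [List.foldl_cons, ih, hx, String.append_assoc]

theorem pv_join_cons (a : String) (l : List String) :
    String.join (a :: l) = a ++ String.join l := by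
  simp only [String.join, List.foldl_cons, String.empty_append]
  exact pv_foldl_append l a

theorem pv_join_append (p q : List String) :
    String.join (p ++ q) = String.join p ++ String.join q := by
  simp only [String.join, List.foldl_append]
  exact pv_foldl_append q _

theorem pv_foldl_str {α : Type} (f : α → String) :
    ∀ (l : List α) (init : String),
      l.foldl (fun h x => h ++ f x) init = init ++ String.join (l.map f) := by
  intro l
  induction l with
  | nil => intro init; simp [String.join]
  | cons x xs ih =>
    intro init
    simp only [List.foldl_cons, List.map_cons, ih, pv_join_cons, String.append_assoc]

-- the items of a given type, in order
def pvF (items : List (List (String × String))) (t : String) : List (List (String × String)) :=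
  items.filter (fun x => pvGet x "type" "other" == t)

theorem pv_hsl (l : List (List (String × String))) :
    PySem.List.slice l none (some 3) = l.take 3 := by
  rw [PySem.List.slice_to l (by norm_num : (0:Int) ≤ 3)]
  rfl

theorem pv_foldA_nonblog (t dt ds : String) (ht : t ≠ "blog")
    (l : List (List (String × String))) (init : String) :
    l.foldl (fun h item =>
      ((h ++ ("<li><strong><a href=\"" ++ pvGet item "link" "#" ++ "\">" ++ pvGet item "title" dt ++ "</a></strong><br>\n"))
        ++ ("<p>" ++ pvGet item "description" "" ++ "</p>\n"))
        ++ ("<p><em>From " ++ pvGet item "source" ds ++ "</em></p></li>\n")) init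
      = init ++ String.join (l.map (pvRender t dt ds)) := by
  have hb : (fun (h : String) (item : List (String × String)) =>
      ((h ++ ("<li><strong><a href=\"" ++ pvGet item "link" "#" ++ "\">" ++ pvGet item "title" dt ++ "</a></strong><br>\n"))
        ++ ("<p>" ++ pvGet item "description" "" ++ "</p>\n"))
        ++ ("<p><em>From " ++ pvGet item "source" ds ++ "</em></p></li>\n"))
      = fun h item => h ++ pvRender t dt ds item := by
    funext h item
    simp [pvRender, ht, String.append_assoc]
  rw [hb]
  exact pv_foldl_str _ l init

theorem pv_foldA_blog (l : List (List (String × String))) (init : String) :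
    l.foldl (fun h item =>
      let description := if pvGet item "summary" "" ≠ "" then pvGet item "summary" "" else pvGet item "description" ""
      let description := if PySem.Str.len description > 150 then PySem.Str.slice description none (some 147) ++ "..." else description
      ((h ++ ("<li><strong><a href=\"" ++ pvGet item "link" "#" ++ "\">" ++ pvGet item "title" "Blog Post" ++ "</a></strong><br>\n"))
        ++ ("<p>" ++ description ++ "</p>\n"))
        ++ ("<p><em>From " ++ pvGet item "source" "Blog" ++ "</em></p></li>\n")) init
      = init ++ String.join (l.map (pvRender "blog" "Blog Post" "Blog")) := by
  have hb : (fun (h : String) (item : List (String × String)) =>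
      let description := if pvGet item "summary" "" ≠ "" then pvGet item "summary" "" else pvGet item "description" ""
      let description := if PySem.Str.len description > 150 then PySem.Str.slice description none (some 147) ++ "..." else description
      ((h ++ ("<li><strong><a href=\"" ++ pvGet item "link" "#" ++ "\">" ++ pvGet item "title" "Blog Post" ++ "</a></strong><br>\n"))
        ++ ("<p>" ++ description ++ "</p>\n"))
        ++ ("<p><em>From " ++ pvGet item "source" "Blog" ++ "</em></p></li>\n"))
      = fun h item => h ++ pvRender "blog" "Blog Post" "Blog" item := by
    funext h item
    simp [pvRender, String.append_assoc]
  rw [hb]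
  exact pv_foldl_str _ l init

theorem pv_join_nil : String.join ([] : List String) = "" := rfl

theorem pv_hite {c₁ c₂ : Prop} [Decidable c₁] [Decidable c₂] (h : c₁ ↔ c₂) (x y : String) :
    (if c₁ then x else y) = if c₂ then x else y := if_congr h rfl rfl

theorem pv_ite_ne {α β : Type} (l : List α) (x y : β) :
    (if l ≠ [] then x else y) = if l = [] then y else x := by
  by_cases h : l = [] <;> simp [h]

theorem pv_ite_isEmpty {α β : Type} (l : List α) (x y : β) :
    (if l.isEmpty = true then x else y) = if l = [] then x else y := by
  cases l <;> simp

theorem pv_take3_isEmpty (l : List (List (String × String))) :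
    (l.take 3).isEmpty = l.isEmpty := by cases l <;> rfl

-- ===== VERDICT (by name: the statement is the Claim_ definition above) =====
set_option maxRecDepth 4096 in
theorem format_social_content_html_spec : Claim_equal_format_social_content_html := by
  unfold Claim_equal_format_social_content_html
  intro items _
  unfold Spec_format_social_content_html
  by_cases h0 : items = []
  · rw [format_social_content_html, format_social_content_html_alt, if_pos h0, if_pos h0]
  · rw [format_social_content_html, format_social_content_html_alt, if_neg h0, if_neg h0]
    simp only []
    set d := items.foldl pvGroupStep PySem.Dict.empty with hd
    have hget : ∀ t, d.getD t [] = pvF items t := by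
      intro t; rw [hd, pv_getD_group]; simp [pvF]
    simp only [List.foldl_cons, List.foldl_nil, pv_take3_isEmpty, hget, pv_hsl]
    have hco : ∀ t, (d.contains t = true ∧ pvF items t ≠ []) ↔ pvF items t ≠ [] := by
      intro t
      exact ⟨And.right, fun h => ⟨pv_contains_of_getD_ne d t (by rw [hget t]; exact h), h⟩⟩
    simp only [pv_hite (hco "youtube"), pv_hite (hco "twitter"), pv_hite (hco "blog")]
    simp only [pv_foldA_nonblog "youtube" "YouTube Video" "YouTube" (by decide),
               pv_foldA_nonblog "twitter" "Tweet" "Twitter/X" (by decide),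
               pv_foldA_blog]
    simp only [← pvF.eq_def]
    simp only [pv_ite_ne, pv_ite_isEmpty]
    split_ifs <;>
      (refine String.toList_inj.mp ?_
       simp [pv_join_cons, pv_join_append, pv_join_nil, String.append_empty])
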